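-- pv_equiv track=rewrite | github.com/quinn-jenkins/advent-of-code-23 | day11/day11.py | getEmptyRows
-- ===== SOURCE A (Python) =====
-- def getEmptyRows(galaxyLocations : [], maxRows) -> []:
--     emptyRows = []
--     for i in range(maxRows):
--         atLeastOneGalaxy = False
--         for galaxyLoc in galaxyLocations:
--             if galaxyLoc[0] == i:
--                 atLeastOneGalaxy = True
--                 break
--         if not atLeastOneGalaxy:
--             emptyRows.append(i)
--     return emptyRows
-- ===== SOURCE B (Python) =====
-- def getEmptyRows(galaxyLocations, maxRows):
--     # Walk the gaps between the sorted distinct occupied rows instead of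
--     # testing membership for every candidate row.
--     occ = sorted(set(g[0] for g in galaxyLocations))
--     out = []
--     expected = 0
--     for r in occ:
--         if r >= expected:
--             out.extend(range(expected, min(r, maxRows)))
--             expected = r + 1
--     out.extend(range(expected, maxRows))
--     return out
-- ===== Notes on version B (the rewrite author's own statement) =====
-- stated objective: faster
-- what changed: Instead of scanning the whole galaxy list for every candidate row, B sorts the deduplicated occupied row indices once and emits the empty rows in one gap-walk over that sorted list with a moving 'expected' cursor.
import Mathlib
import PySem

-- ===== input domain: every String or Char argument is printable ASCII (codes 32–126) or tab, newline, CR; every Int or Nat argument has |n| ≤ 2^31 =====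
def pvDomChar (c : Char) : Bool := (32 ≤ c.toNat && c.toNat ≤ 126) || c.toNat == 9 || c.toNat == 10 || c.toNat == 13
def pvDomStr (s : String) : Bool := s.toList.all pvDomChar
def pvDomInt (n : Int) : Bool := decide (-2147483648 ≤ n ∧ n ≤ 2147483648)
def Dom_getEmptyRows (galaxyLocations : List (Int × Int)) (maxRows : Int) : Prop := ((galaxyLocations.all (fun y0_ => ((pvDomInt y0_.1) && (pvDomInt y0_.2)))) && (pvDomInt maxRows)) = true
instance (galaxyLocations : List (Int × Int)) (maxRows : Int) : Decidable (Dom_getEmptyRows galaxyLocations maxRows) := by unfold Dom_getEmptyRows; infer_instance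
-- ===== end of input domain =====

-- B replaces A's membership scan per candidate row by a single gap-walk over
-- the sorted distinct occupied rows (objective: faster, O((n+m) log n) vs O(n*m)).

-- ===== PORT A =====
-- inner 'for galaxyLoc in galaxyLocations: if galaxyLoc[0] == i: …; break'
def pvHasGalaxy (galaxyLocations : List (Int × Int)) (i : Int) : Bool :=
  match galaxyLocations with
  | [] => false
  | g :: rest => if g.1 == i then true else pvHasGalaxy rest i

def getEmptyRows (galaxyLocations : List (Int × Int)) (maxRows : Int) : List Int :=
  (PySem.List.pyRange 0 maxRows 1).foldl
    (fun emptyRows i => if !(pvHasGalaxy galaxyLocations i) then emptyRows ++ [i] else emptyRows) []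

-- ===== PORT B =====
-- the 'for r in occ' loop of Source B plus the trailing extend, with 'expected' as state
def pvGapWalk (occ : List Int) (expected maxRows : Int) : List Int :=
  match occ with
  | [] => PySem.List.pyRange expected maxRows 1
  | r :: rest =>
    if expected ≤ r then
      PySem.List.pyRange expected (min r maxRows) 1 ++ pvGapWalk rest (r + 1) maxRows
    else pvGapWalk rest expected maxRows

def getEmptyRows_alt (galaxyLocations : List (Int × Int)) (maxRows : Int) : List Int :=
  pvGapWalk (PySem.List.sorted (PySem.Set.ofList (galaxyLocations.map Prod.fst)) (fun x => x) false)
    0 maxRows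

-- ===== PRECONDITION & SPEC =====
def Spec_getEmptyRows (galaxyLocations : List (Int × Int)) (maxRows : Int) (out : List Int) : Prop := out = getEmptyRows_alt galaxyLocations maxRows
instance (galaxyLocations : List (Int × Int)) (maxRows : Int) (out : List Int) : Decidable (Spec_getEmptyRows galaxyLocations maxRows out) := by unfold Spec_getEmptyRows; infer_instance

-- ===== CLAIM (what is proved, stated in full; the proofs are below) =====
def Claim_equal_getEmptyRows : Prop := ∀ (galaxyLocations : List (Int × Int)) (maxRows : Int), Dom_getEmptyRows galaxyLocations maxRows → Spec_getEmptyRows galaxyLocations maxRows (getEmptyRows galaxyLocations maxRows)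

-- ===== LEMMAS AND PROOFS =====

theorem pvHasGalaxy_eq_mem (gl : List (Int × Int)) (i : Int) :
    pvHasGalaxy gl i = decide (i ∈ gl.map Prod.fst) := by
  induction gl with
  | nil => simp [pvHasGalaxy]
  | cons g rest ih =>
    simp only [pvHasGalaxy, ih, List.map_cons, List.mem_cons]
    by_cases h : g.1 = i
    · simp [h]
    · simp [h, Ne.symm h]

theorem pvGapWalk_eq_filter (occ : List Int) (hs : occ.Pairwise (· < ·)) :
    ∀ (exp m : Int), pvGapWalk occ exp m
      = (PySem.List.pyRange exp m 1).filter (fun i => !decide (i ∈ occ)) := by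
  induction occ with
  | nil => intro exp m; simp [pvGapWalk]
  | cons r rest ih =>
    intro exp m
    have hrest : ∀ x ∈ rest, r < x := (List.pairwise_cons.mp hs).1
    have hsrest : rest.Pairwise (· < ·) := (List.pairwise_cons.mp hs).2
    by_cases hle : exp ≤ r
    · simp only [pvGapWalk, if_pos hle]
      by_cases hrm : r < m
      · have hmin : min r m = r := min_eq_left (le_of_lt hrm)
        have hsplit : PySem.List.pyRange exp m 1
            = PySem.List.pyRange exp r 1 ++ PySem.List.pyRange r m 1 :=
          PySem.List.pyRange_one_append exp r m hle (le_of_lt hrm)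
        have hsplit2 : PySem.List.pyRange r m 1 = r :: PySem.List.pyRange (r + 1) m 1 :=
          PySem.List.pyRange_one_cons hrm
        rw [hmin, hsplit, hsplit2, List.filter_append, List.filter_cons]
        have h1 : (PySem.List.pyRange exp r 1).filter (fun i => !decide (i ∈ r :: rest))
            = PySem.List.pyRange exp r 1 := by
          apply List.filter_eq_self.mpr
          intro x hx
          have hxr : x < r := (PySem.List.mem_pyRange_one.mp hx).2
          simp only [List.mem_cons, Bool.not_eq_true', decide_eq_false_iff_not]
          push Not
          exact ⟨ne_of_lt hxr, fun hxm => absurd (hrest x hxm) (by omega)⟩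
        have h2 : (PySem.List.pyRange (r + 1) m 1).filter (fun i => !decide (i ∈ r :: rest))
            = (PySem.List.pyRange (r + 1) m 1).filter (fun i => !decide (i ∈ rest)) := by
          apply List.filter_congr
          intro x hx
          have hxr : r + 1 ≤ x := (PySem.List.mem_pyRange_one.mp hx).1
          simp only [List.mem_cons]
          have : ¬ x = r := by omega
          simp [this]
        rw [h1, h2, ih hsrest]
        simp
      · have hmin : min r m = m := min_eq_right (by omega)
        have hnil : PySem.List.pyRange (r + 1) m 1 = [] :=
          PySem.List.pyRange_one_eq_nil (by omega)
        rw [hmin, ih hsrest, hnil]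
        simp only [List.filter_nil, List.append_nil]
        symm
        apply List.filter_eq_self.mpr
        intro x hx
        have hxm : x < m := (PySem.List.mem_pyRange_one.mp hx).2
        simp only [List.mem_cons, Bool.not_eq_true', decide_eq_false_iff_not]
        push Not
        exact ⟨by omega, fun hxm' => absurd (hrest x hxm') (by omega)⟩
    · simp only [pvGapWalk, if_neg hle]
      rw [ih hsrest]
      apply List.filter_congr
      intro x hx
      have hxe : exp ≤ x := (PySem.List.mem_pyRange_one.mp hx).1
      have : ¬ x = r := by omega
      simp [this]

-- ===== VERDICT (by name: the statement is the Claim_ definition above) =====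
theorem getEmptyRows_spec : Claim_equal_getEmptyRows := by
  intro gl m _
  unfold Spec_getEmptyRows getEmptyRows getEmptyRows_alt
  set occ := PySem.List.sorted (PySem.Set.ofList (gl.map Prod.fst)) (fun x => x) false with hocc
  have hsorted : occ.Pairwise (· < ·) := PySem.List.sorted_ofList_pairwise_lt _
  rw [pvGapWalk_eq_filter occ hsorted 0 m,
      PySem.List.foldl_append_if_eq_filter]
  simp only [List.nil_append]
  apply List.filter_congr
  intro x _
  have hmem : x ∈ occ ↔ x ∈ gl.map Prod.fst := by
    rw [hocc, PySem.List.mem_sorted, PySem.Set.mem_ofList]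
  rw [pvHasGalaxy_eq_mem]
  by_cases h : x ∈ gl.map Prod.fst <;> simp [h, hmem]
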